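-- pv_equiv track=rewrite | github.com/aryansingh2206/Invoice-Extraction-Pipeline | src/extractors/dates.py | _normalize_month
-- ===== SOURCE A (Python) =====
-- MONTH_MAP = {
--     "jan": "January",
--     "januar": "January",
--     "feb": "February",
--     "februar": "February",
--     "mär": "March",
--     "maerz": "March",
--     "märz": "March",
--     "mar": "March",
--     "mrz": "March",
--     "apr": "April",
--     "april": "April",
--     "mai": "May",
--     "jun": "June",
--     "juni": "June",
--     "jul": "July",
--     "juli": "July",
--     "aug": "August",
--     "august": "August",
--     "sep": "September",
--     "sept": "September",
--     "september": "September",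
--     "okt": "October",
--     "oktober": "October",
--     "oct": "October",
--     "nov": "November",
--     "november": "November",
--     "dez": "December",
--     "dezember": "December",
--     "dec": "December",
-- }
--
-- def _normalize_month(raw: str) -> str | None:
--     """
--     Handle OCR slippage: jaur, jaui, dezemeber, nove, n0v
--     Approach:
--       - remove accents & punctuation
--       - compare prefix lengths
--     """
--     r = raw.lower().replace(".", "").replace("0", "o")  # OCR: N0v → Nov
--
--     # exact
--     if r in MONTH_MAP:
--         return r
--
--     # prefix fuzzy: compare first 3 letters
--     for key in MONTH_MAP.keys():
--         if r[:3] == key[:3]: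
--             return key
--
--     # fallback: compare first 2
--     for key in MONTH_MAP.keys():
--         if r[:2] == key[:2]:
--             return key
--
--     return None
-- ===== SOURCE B (Python) =====
-- MONTH_MAP = {
--     "jan": "January", "januar": "January",
--     "feb": "February", "februar": "February",
--     "mär": "March", "maerz": "March", "märz": "March", "mar": "March", "mrz": "March",
--     "apr": "April", "april": "April",
--     "mai": "May",
--     "jun": "June", "juni": "June",
--     "jul": "July", "juli": "July",
--     "aug": "August", "august": "August",
--     "sep": "September", "sept": "September", "september": "September",
--     "okt": "October", "oktober": "October", "oct": "October",
--     "nov": "November", "november": "November",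
--     "dez": "December", "dezember": "December", "dec": "December",
-- }
--
-- # Built once at import: first MONTH_MAP key per 3-letter and per 2-letter prefix
-- # (setdefault keeps the first, preserving the original scan's tie-breaking).
-- _PREFIX3 = {}
-- for _k in MONTH_MAP:
--     _PREFIX3.setdefault(_k[:3], _k)
-- _PREFIX2 = {}
-- for _k in MONTH_MAP:
--     _PREFIX2.setdefault(_k[:2], _k)
--
--
-- def _normalize_month(raw: str) -> str | None:
--     r = raw.lower().replace(".", "").replace("0", "o")
--     if r in MONTH_MAP:
--         return r
--     hit = _PREFIX3.get(r[:3])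
--     if hit is not None:
--         return hit
--     return _PREFIX2.get(r[:2])
-- ===== Notes on version B (the rewrite author's own statement) =====
-- stated objective: idiomatic
-- what changed: B precomputes two module-level prefix->first-key tables (via setdefault, so insertion-order tie-breaking is kept) and replaces A's two linear scans over MONTH_MAP with dict lookups of r[:3] and r[:2].
import Mathlib
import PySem

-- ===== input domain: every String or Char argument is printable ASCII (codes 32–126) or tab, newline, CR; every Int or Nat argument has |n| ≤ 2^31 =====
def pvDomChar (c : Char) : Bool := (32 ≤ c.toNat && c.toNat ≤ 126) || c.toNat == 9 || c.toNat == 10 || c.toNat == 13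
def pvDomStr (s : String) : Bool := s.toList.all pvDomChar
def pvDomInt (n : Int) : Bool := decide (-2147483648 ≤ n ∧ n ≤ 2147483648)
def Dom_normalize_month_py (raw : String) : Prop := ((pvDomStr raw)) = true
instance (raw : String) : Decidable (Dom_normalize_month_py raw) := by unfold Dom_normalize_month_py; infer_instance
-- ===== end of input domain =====

-- B replaces A's two linear prefix scans over MONTH_MAP with two prefix→first-key tables
-- built once (setdefault keeps the first key, preserving A's tie-breaking); objective: idiomatic.

-- ===== PORT A =====
-- MONTH_MAP (shared module constant)
def pvMonthMap : PySem.Dict String String := PySem.Dict.ofList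
  [("jan", "January"), ("januar", "January"),
   ("feb", "February"), ("februar", "February"),
   ("mär", "March"), ("maerz", "March"), ("märz", "March"), ("mar", "March"), ("mrz", "March"),
   ("apr", "April"), ("april", "April"),
   ("mai", "May"),
   ("jun", "June"), ("juni", "June"),
   ("jul", "July"), ("juli", "July"),
   ("aug", "August"), ("august", "August"),
   ("sep", "September"), ("sept", "September"), ("september", "September"),
   ("okt", "October"), ("oktober", "October"), ("oct", "October"),
   ("nov", "November"), ("november", "November"),
   ("dez", "December"), ("dezember", "December"), ("dec", "December")]

-- A's 'for key in MONTH_MAP.keys(): if r[:n] == key[:n]: return key' loop (early return)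
def pvPrefixScan (r : String) (n : Int) : List String → Option String
  | [] => none
  | k :: ks =>
      if PySem.Str.slice r none (some n) == PySem.Str.slice k none (some n)
      then some k else pvPrefixScan r n ks

def normalize_month_py (raw : String) : Option String :=
  let r := PySem.Str.replace (PySem.Str.replace (PySem.Str.lower raw) "." "") "0" "o"
  if pvMonthMap.contains r then some r
  else
    match pvPrefixScan r 3 pvMonthMap.keys with
    | some k => some k
    | none => pvPrefixScan r 2 pvMonthMap.keys

-- ===== PORT B =====
-- module-level tables: first MONTH_MAP key per 3-letter / 2-letter prefix (setdefault keeps first)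
def pvPrefix3 : PySem.Dict String String :=
  pvMonthMap.keys.foldl
    (fun d k => d.setdefault (PySem.Str.slice k none (some 3)) k) PySem.Dict.empty

def pvPrefix2 : PySem.Dict String String :=
  pvMonthMap.keys.foldl
    (fun d k => d.setdefault (PySem.Str.slice k none (some 2)) k) PySem.Dict.empty

def normalize_month_py_alt (raw : String) : Option String :=
  let r := PySem.Str.replace (PySem.Str.replace (PySem.Str.lower raw) "." "") "0" "o"
  if pvMonthMap.contains r then some r
  else
    match pvPrefix3.get? (PySem.Str.slice r none (some 3)) with
    | some hit => some hit
    | none => pvPrefix2.get? (PySem.Str.slice r none (some 2))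

-- ===== PRECONDITION & SPEC =====
def Spec_normalize_month_py (raw : String) (out : Option String) : Prop := out = normalize_month_py_alt raw
instance (raw : String) (out : Option String) : Decidable (Spec_normalize_month_py raw out) := by unfold Spec_normalize_month_py; infer_instance

-- ===== CLAIM (what is proved, stated in full; the proofs are below) =====
def Claim_equal_normalize_month_py : Prop := ∀ (raw : String), Dom_normalize_month_py raw → Spec_normalize_month_py raw (normalize_month_py raw)

-- ===== LEMMAS AND PROOFS =====

-- A setdefault-built prefix table, looked up at r's prefix, computes A's first-match scan.
lemma pvTable_get_eq_scan (r : String) (n : Int) :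
    ∀ (keys : List String) (d : PySem.Dict String String),
      (keys.foldl (fun d k => d.setdefault (PySem.Str.slice k none (some n)) k) d).get?
          (PySem.Str.slice r none (some n))
        = ((d.get? (PySem.Str.slice r none (some n))).orElse
            (fun _ => pvPrefixScan r n keys)) := by
  intro keys
  induction keys with
  | nil =>
      intro d
      cases h : d.get? (PySem.Str.slice r none (some n)) <;>
        simp [pvPrefixScan, h, Option.orElse]
  | cons k ks ih =>
      intro d
      simp only [List.foldl_cons, ih, pvPrefixScan]
      by_cases h : PySem.Str.slice r none (some n) = PySem.Str.slice k none (some n)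
      · rw [← h]
        rw [PySem.Dict.get?_setdefault_self]
        cases d.get? (PySem.Str.slice r none (some n)) <;>
          simp [Option.orElse]
      · rw [PySem.Dict.get?_setdefault_of_ne (hne := h)]
        simp [h, Option.orElse]

lemma pvPrefix3_get (r : String) :
    pvPrefix3.get? (PySem.Str.slice r none (some 3)) = pvPrefixScan r 3 pvMonthMap.keys := by
  rw [pvPrefix3, pvTable_get_eq_scan]
  simp [Option.orElse]

lemma pvPrefix2_get (r : String) :
    pvPrefix2.get? (PySem.Str.slice r none (some 2)) = pvPrefixScan r 2 pvMonthMap.keys := by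
  rw [pvPrefix2, pvTable_get_eq_scan]
  simp [Option.orElse]

-- ===== VERDICT (by name: the statement is the Claim_ definition above) =====
theorem normalize_month_py_spec : Claim_equal_normalize_month_py := by
  intro raw _
  unfold Spec_normalize_month_py normalize_month_py normalize_month_py_alt
  simp only [pvPrefix3_get, pvPrefix2_get]
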